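-- pv_equiv track=rewrite | github.com/MSelcukAkbas/OkeyVision | tools/hsv_normalizer.py | hsv_normalizer
-- ===== SOURCE A (Python) =====
-- def hsv_normalizer(color_list):
--
--     normal_list=[]
--     for i in range(0, len(color_list), 4):
--
--         group = color_list[i:i+4]
--
--         if len(group) == 4:
--             h_avg = sum([item[0] for item in group]) // 4
--             s_avg = sum([item[1] for item in group]) // 4
--             v_avg = sum([item[2] for item in group]) // 4
--             normal_list.append((h_avg, s_avg, v_avg))
--
--     return normal_list
-- ===== SOURCE B (Python) =====
-- def hsv_normalizer(color_list):
--     normal_list = []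
--     h_sum = 0
--     s_sum = 0
--     v_sum = 0
--     count = 0
--     for h, s, v in color_list:
--         h_sum += h
--         s_sum += s
--         v_sum += v
--         count += 1
--         if count == 4:
--             normal_list.append((h_sum // 4, s_sum // 4, v_sum // 4))
--             h_sum = 0
--             s_sum = 0
--             v_sum = 0
--             count = 0
--     return normal_list
-- ===== Notes on version B (the rewrite author's own statement) =====
-- stated objective: alternative
-- what changed: Replaces the index-stepped loop that slices out each 4-tuple group and runs three list comprehensions plus sum over it with a single flat pass over the elements threading three running sums and a counter, emitting an averaged tuple and resetting whenever the counter reaches 4 (a trailing partial group never triggers the emit, matching A's len==4 guard).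
import Mathlib
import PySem

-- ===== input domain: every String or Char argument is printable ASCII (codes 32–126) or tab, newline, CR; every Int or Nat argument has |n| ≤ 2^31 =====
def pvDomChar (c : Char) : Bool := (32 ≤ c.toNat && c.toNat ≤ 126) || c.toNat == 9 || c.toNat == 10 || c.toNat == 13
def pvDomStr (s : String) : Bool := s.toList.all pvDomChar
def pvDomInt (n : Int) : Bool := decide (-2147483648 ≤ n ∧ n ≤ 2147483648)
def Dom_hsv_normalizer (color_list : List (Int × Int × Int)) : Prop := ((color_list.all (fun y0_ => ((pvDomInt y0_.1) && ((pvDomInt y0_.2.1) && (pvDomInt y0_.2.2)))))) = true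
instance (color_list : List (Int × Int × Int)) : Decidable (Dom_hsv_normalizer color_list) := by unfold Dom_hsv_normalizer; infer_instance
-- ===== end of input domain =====

-- B replaces A's index-stepped slice-and-three-comprehensions grouping with one flat pass
-- threading three running sums and a counter (objective: alternative decomposition,
-- avoiding slices and intermediate lists; same O(n) cost).


-- ===== PORT A =====
-- loop body of A: slice out color_list[i:i+4]; if it has 4 members, append the averaged tuple
def hsvA_step (color_list : List (Int × Int × Int)) (normal_list : List (Int × Int × Int)) (i : Int) : List (Int × Int × Int) :=
  let group := PySem.List.slice color_list (some i) (some (i + 4))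
  if group.length == 4 then
    normal_list ++ [(PySem.Int.floordiv ((group.map (fun item => item.1)).sum) 4,
                     PySem.Int.floordiv ((group.map (fun item => item.2.1)).sum) 4,
                     PySem.Int.floordiv ((group.map (fun item => item.2.2)).sum) 4)]
  else normal_list

def hsv_normalizer (color_list : List (Int × Int × Int)) : List (Int × Int × Int) :=
  (PySem.List.pyRange 0 (color_list.length : Int) 4).foldl (hsvA_step color_list) []

-- ===== PORT B =====
-- loop body of B: add the components into the running sums, bump the counter; on the
-- fourth element emit the averaged tuple and reset everything
def hsvB_step (st : List (Int × Int × Int) × Int × Int × Int × Int) (x : Int × Int × Int) :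
    List (Int × Int × Int) × Int × Int × Int × Int :=
  let h_sum := st.2.1 + x.1
  let s_sum := st.2.2.1 + x.2.1
  let v_sum := st.2.2.2.1 + x.2.2
  let count := st.2.2.2.2 + 1
  if count == 4 then
    (st.1 ++ [(PySem.Int.floordiv h_sum 4, PySem.Int.floordiv s_sum 4, PySem.Int.floordiv v_sum 4)],
     0, 0, 0, 0)
  else (st.1, h_sum, s_sum, v_sum, count)

def hsv_normalizer_alt (color_list : List (Int × Int × Int)) : List (Int × Int × Int) :=
  (color_list.foldl hsvB_step ([], 0, 0, 0, 0)).1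

-- ===== PRECONDITION & SPEC =====
def Spec_hsv_normalizer (color_list : List (Int × Int × Int)) (out : List (Int × Int × Int)) : Prop := out = hsv_normalizer_alt color_list
instance (color_list : List (Int × Int × Int)) (out : List (Int × Int × Int)) : Decidable (Spec_hsv_normalizer color_list out) := by unfold Spec_hsv_normalizer; infer_instance

-- ===== CLAIM (what is proved, stated in full; the proofs are below) =====
def Claim_equal_hsv_normalizer : Prop := ∀ (color_list : List (Int × Int × Int)), Dom_hsv_normalizer color_list → Spec_hsv_normalizer color_list (hsv_normalizer color_list)

-- ===== LEMMAS AND PROOFS =====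

-- reference: group-of-four averaging, structural recursion
def g4 : List (Int × Int × Int) → List (Int × Int × Int)
  | [] => []
  | [_] => []
  | [_, _] => []
  | [_, _, _] => []
  | a :: b :: c :: d :: r =>
      (PySem.Int.floordiv (a.1 + b.1 + c.1 + d.1) 4,
       PySem.Int.floordiv (a.2.1 + b.2.1 + c.2.1 + d.2.1) 4,
       PySem.Int.floordiv (a.2.2 + b.2.2 + c.2.2 + d.2.2) 4) :: g4 r

lemma range4_shift (n : Nat) :
    PySem.List.pyRange 0 ((n : Int) + 4) 4 = 0 :: (PySem.List.pyRange 0 (n : Int) 4).map (· + 4) := by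
  rw [PySem.List.pyRange_of_pos _ _ (by norm_num : (0:Int) < 4),
      PySem.List.pyRange_of_pos _ _ (by norm_num : (0:Int) < 4)]
  rcases Nat.eq_zero_or_pos n with h | h
  · subst h; decide
  · have h1 : (0:Int) < (n:Int) + 4 := by positivity
    have h2 : (0:Int) < (n:Int) := by exact_mod_cast h
    rw [if_pos (by omega), if_pos (by omega)]
    have hc : (((n:Int) + 4 - 0 + 4 - 1) / 4).toNat = (((n:Int) - 0 + 4 - 1) / 4).toNat + 1 := by
      omega
    rw [hc, List.range_succ_eq_map]
    simp only [List.map_cons, List.map_map, Nat.cast_zero, mul_zero, zero_add]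
    refine congrArg₂ List.cons (by norm_num) ?_
    apply List.map_congr_left
    intro k _
    simp only [Function.comp_apply, Nat.succ_eq_add_one]
    push_cast
    ring

lemma hsvA_step_acc (cl : List (Int × Int × Int)) (l : List Int) (acc : List (Int × Int × Int)) :
    l.foldl (hsvA_step cl) acc = acc ++ l.foldl (hsvA_step cl) [] := by
  induction l generalizing acc with
  | nil => simp
  | cons i t ih =>
      simp only [List.foldl_cons]
      rw [ih, ih (hsvA_step cl [] i)]
      by_cases h : ((PySem.List.slice cl (some i) (some (i + 4))).length == 4) = true <;>
        simp [hsvA_step, h]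

lemma slice_shift (a b c d : Int × Int × Int) (r : List (Int × Int × Int)) (i : Int) (hi : 0 ≤ i) :
    PySem.List.slice (a :: b :: c :: d :: r) (some (i + 4)) (some (i + 4 + 4)) =
      PySem.List.slice r (some i) (some (i + 4)) := by
  rw [PySem.List.slice_toNat _ (by omega) (by omega), PySem.List.slice_toNat _ hi (by omega)]
  have h1 : (i + 4).toNat = ((i.toNat + 1) + 1 + 1) + 1 := by omega
  have h2 : (i + 4 + 4).toNat - (i.toNat + 1 + 1 + 1 + 1) = 4 := by omega
  have h3 : i.toNat + 1 + 1 + 1 + 1 - i.toNat = 4 := by omega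
  rw [h1, h2, h3]
  simp [List.drop_succ_cons]

lemma A_eq_g4 (cl : List (Int × Int × Int)) : hsv_normalizer cl = g4 cl := by
  induction cl using g4.induct with
  | case1 => simp [hsv_normalizer, g4, show PySem.List.pyRange 0 0 4 = [] from by decide]
  | case2 x =>
      simp [hsv_normalizer, g4, show PySem.List.pyRange 0 1 4 = [0] from by decide,
            hsvA_step, PySem.List.slice]
  | case3 x y =>
      simp [hsv_normalizer, g4, show PySem.List.pyRange 0 2 4 = [0] from by decide,
            hsvA_step, PySem.List.slice]
  | case4 x y z =>
      simp [hsv_normalizer, g4, show PySem.List.pyRange 0 3 4 = [0] from by decide,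
            hsvA_step, PySem.List.slice]
  | case5 a b c d r ih =>
      unfold hsv_normalizer
      have hl : (((a :: b :: c :: d :: r).length : Nat) : Int) = (r.length : Int) + 4 := by
        push_cast [List.length_cons]; ring
      rw [hl, range4_shift r.length, List.foldl_cons, List.foldl_map]
      have h0 : hsvA_step (a :: b :: c :: d :: r) [] 0 =
          [(PySem.Int.floordiv (a.1 + b.1 + c.1 + d.1) 4,
            PySem.Int.floordiv (a.2.1 + b.2.1 + c.2.1 + d.2.1) 4,
            PySem.Int.floordiv (a.2.2 + b.2.2 + c.2.2 + d.2.2) 4)] := by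
        simp [hsvA_step, PySem.List.slice]
        refine ⟨?_, ?_, ?_⟩ <;> ring_nf
      rw [h0]
      rw [PySem.List.foldl_congr_mem _ _ (hsvA_step r) _ (by
        intro acc i hi
        have h0i : 0 ≤ i :=
          ((PySem.List.mem_pyRange_iff_of_pos (by norm_num) i).1 hi).1
        unfold hsvA_step
        rw [slice_shift a b c d r i h0i])]
      rw [hsvA_step_acc]
      unfold hsv_normalizer at ih
      rw [ih]
      simp [g4]

lemma B_eq_g4 (cl : List (Int × Int × Int)) (out : List (Int × Int × Int)) :
    (cl.foldl hsvB_step (out, 0, 0, 0, 0)).1 = out ++ g4 cl := by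
  induction cl using g4.induct generalizing out with
  | case1 => simp [g4]
  | case2 x => simp [hsvB_step, g4]
  | case3 x y => simp [hsvB_step, g4]
  | case4 x y z => simp [hsvB_step, g4]
  | case5 a b c d r ih =>
      simp only [List.foldl_cons]
      have h4 : hsvB_step (hsvB_step (hsvB_step (hsvB_step (out, 0, 0, 0, 0) a) b) c) d =
          (out ++ [(PySem.Int.floordiv (a.1 + b.1 + c.1 + d.1) 4,
                    PySem.Int.floordiv (a.2.1 + b.2.1 + c.2.1 + d.2.1) 4,
                    PySem.Int.floordiv (a.2.2 + b.2.2 + c.2.2 + d.2.2) 4)], 0, 0, 0, 0) := by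
        simp [hsvB_step]
      rw [h4, ih]
      simp [g4]

-- ===== VERDICT (by name: the statement is the Claim_ definition above) =====
theorem hsv_normalizer_spec : Claim_equal_hsv_normalizer := by
  intro cl _
  unfold Spec_hsv_normalizer hsv_normalizer_alt
  rw [A_eq_g4, B_eq_g4]
  simp
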